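-- pv_equiv track=rewrite | github.com/George-King-123/WXML-Extremal-Groups | messing_with_D_inf.py | conj_one_sign
-- ===== SOURCE A (Python) =====
-- from math import comb
--
-- def conj_one_sign(k, n):
--   def g(n, k, j):
--     return comb(j - 1 + k - 1, k-1) * comb(n - j - 1 + k- 1, k - 1)
--   res = comb(n + k - 2, k - 2)
--   for j in range (1, n+1):
--     res += g(n, k, j)
--
--   if (k % 2 == 1):
--     res -= g(n, k, (k+1)//2)
--     c = (k+1)//2 - 1
--     res += comb(c + k - 1, k-1) * (comb(c + k - 1, k-1) - 1) + 1
--   return res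
-- ===== SOURCE B (Python) =====
-- from math import comb
--
-- def conj_one_sign(k, n):
--   # Vandermonde convolution collapses A's O(n)-term loop into one binomial.
--   res = comb(n + k - 2, k - 2) + comb(n + 2*k - 3, 2*k - 1)
--   if k % 2 == 1:
--     j = (k + 1) // 2
--     a = comb(j + k - 2, k - 1)
--     res += a * (a - 1) + 1 - a * comb(n - j + k - 2, k - 1)
--   return res
-- ===== Notes on version B (the rewrite author's own statement) =====
-- stated objective: faster
-- what changed: The O(n)-term loop of binomial products is replaced by its Vandermonde-convolution closed form comb(n+2k-3, 2k-1), so B computes a constant number of binomials.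
import Mathlib
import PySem

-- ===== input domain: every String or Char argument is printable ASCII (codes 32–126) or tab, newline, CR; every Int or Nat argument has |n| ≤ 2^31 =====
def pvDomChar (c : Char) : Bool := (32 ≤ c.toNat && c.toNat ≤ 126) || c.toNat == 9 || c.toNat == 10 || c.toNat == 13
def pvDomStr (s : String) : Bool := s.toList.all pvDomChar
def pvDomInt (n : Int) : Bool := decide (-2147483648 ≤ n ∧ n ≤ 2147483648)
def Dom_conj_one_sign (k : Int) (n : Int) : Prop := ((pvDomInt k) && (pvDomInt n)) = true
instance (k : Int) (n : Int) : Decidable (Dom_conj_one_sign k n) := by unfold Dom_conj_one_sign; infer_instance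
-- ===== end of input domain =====

-- B replaces A's loop of n binomial products by its Vandermonde-convolution closed
-- form comb(n+2k-3, 2k-1): constantly many binomial evaluations instead of O(n).

-- math.comb m r, exact for 0 ≤ m ∧ 0 ≤ r; Python raises ValueError on a negative
-- argument — all such inputs are excluded by Pre_conj_one_sign.  Like CPython's
-- math.comb, it is computed by the falling-factorial product over min(r, m-r)
-- factors; pvPyCombNat_eq_choose (below) proves it equal to Nat.choose.
def pvFallFact (m r : Nat) : Nat := (List.range r).foldl (fun acc i => acc * (m - i)) 1

def pyCombNat (m r : Nat) : Nat :=
  if r ≤ m then pvFallFact m (min r (m - r)) / Nat.factorial (min r (m - r)) else 0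

def pyComb (m r : Int) : Int := if 0 ≤ m ∧ 0 ≤ r then (pyCombNat m.toNat r.toNat : Int) else 0

-- ===== PORT A =====
def conj_one_sign (k : Int) (n : Int) : Int :=
  let g : Int → Int → Int → Int := fun n k j =>
    pyComb (j - 1 + k - 1) (k - 1) * pyComb (n - j - 1 + k - 1) (k - 1)
  let res := pyComb (n + k - 2) (k - 2)
  let res := (PySem.List.pyRange 1 (n + 1) 1).foldl (fun r j => r + g n k j) res
  if PySem.Int.mod k 2 == 1 then
    let res := res - g n k (PySem.Int.floordiv (k + 1) 2)
    let c := PySem.Int.floordiv (k + 1) 2 - 1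
    res + pyComb (c + k - 1) (k - 1) * (pyComb (c + k - 1) (k - 1) - 1) + 1
  else res

-- ===== PORT B =====
def conj_one_sign_alt (k : Int) (n : Int) : Int :=
  let res := pyComb (n + k - 2) (k - 2) + pyComb (n + 2 * k - 3) (2 * k - 1)
  if PySem.Int.mod k 2 == 1 then
    let j := PySem.Int.floordiv (k + 1) 2
    let a := pyComb (j + k - 2) (k - 1)
    res + (a * (a - 1) + 1 - a * pyComb (n - j + k - 2) (k - 1))
  else res

-- ===== PRECONDITION & SPEC =====
-- Exactly the inputs on which Python's A returns normally: every argument that A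
-- passes to math.comb is nonnegative (otherwise math.comb raises ValueError).
def Pre_conj_one_sign (k : Int) (n : Int) : Prop :=
  2 ≤ k ∧ 2 - k ≤ n ∧ (PySem.Int.mod k 2 = 1 → 0 ≤ n - PySem.Int.floordiv (k + 1) 2 + k - 2)
instance (k : Int) (n : Int) : Decidable (Pre_conj_one_sign k n) := by
  unfold Pre_conj_one_sign; infer_instance
def pvWitness_conj_one_sign : Int × Int := (3, 2)

def Spec_conj_one_sign (k : Int) (n : Int) (out : Int) : Prop := out = conj_one_sign_alt k n
instance (k : Int) (n : Int) (out : Int) : Decidable (Spec_conj_one_sign k n out) := by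
  unfold Spec_conj_one_sign; infer_instance

-- ===== CLAIM (what is proved, stated in full; the proofs are below) =====
def Claim_equal_conj_one_sign : Prop := ∀ (k : Int) (n : Int), Dom_conj_one_sign k n → Pre_conj_one_sign k n → Spec_conj_one_sign k n (conj_one_sign k n)

-- ===== LEMMAS AND PROOFS =====

theorem pvChooseCongr (a b c d : ℕ) (h1 : a = c) (h2 : b = d) : a.choose b = c.choose d := by
  rw [h1, h2]

-- Hockey stick: ∑_{i≤m} C(i+a, a) = C(m+a+1, a+1).
theorem pvHockey (a : ℕ) : ∀ m : ℕ,
    (∑ i ∈ Finset.range (m + 1), (i + a).choose a) = (m + a + 1).choose (a + 1) := by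
  intro m
  induction m with
  | zero => simp
  | succ m ih =>
    rw [Finset.sum_range_succ, ih]
    have h := Nat.choose_succ_succ' (m + a + 1) a
    have e1 : (m + 1 + a + 1).choose (a + 1) = (m + a + 1 + 1).choose (a + 1) :=
      pvChooseCongr _ _ _ _ (by omega) rfl
    have e2 : (m + 1 + a).choose a = (m + a + 1).choose a :=
      pvChooseCongr _ _ _ _ (by omega) rfl
    omega

-- Vandermonde-type convolution on upper indices:
-- ∑_{i≤m} C(i+a, a) · C((m-i)+b, b) = C(m+a+b+1, a+b+1).
theorem pvConv : ∀ (b a m : ℕ),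
    (∑ i ∈ Finset.range (m + 1), (i + a).choose a * ((m - i) + b).choose b)
      = (m + a + b + 1).choose (a + b + 1) := by
  intro b
  induction b with
  | zero =>
    intro a m
    simpa using pvHockey a m
  | succ b ih =>
    intro a m
    induction m with
    | zero => simp
    | succ m ihm =>
      have split : ∀ i ∈ Finset.range (m + 1 + 1),
          (i + a).choose a * ((m + 1 - i) + (b + 1)).choose (b + 1)
            = (i + a).choose a * ((m + 1 - i) + b).choose b
              + (i + a).choose a * ((m + 1 - i) + b).choose (b + 1) := by
        intro i hi
        rw [show (m + 1 - i) + (b + 1) = ((m + 1 - i) + b) + 1 by omega,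
          Nat.choose_succ_succ' ((m + 1 - i) + b) b, Nat.mul_add]
      rw [Finset.sum_congr rfl split, Finset.sum_add_distrib]
      have h1 : (∑ i ∈ Finset.range (m + 1 + 1), (i + a).choose a * ((m + 1 - i) + b).choose b)
          = (m + 1 + a + b + 1).choose (a + b + 1) := ih a (m + 1)
      have h2 : (∑ i ∈ Finset.range (m + 1 + 1), (i + a).choose a * ((m + 1 - i) + b).choose (b + 1))
          = (m + a + (b + 1) + 1).choose (a + (b + 1) + 1) := by
        rw [Finset.sum_range_succ]
        have hlast : ((m + 1 - (m + 1)) + b).choose (b + 1) = 0 := by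
          exact Nat.choose_eq_zero_of_lt (by omega)
        have hbody : ∀ i ∈ Finset.range (m + 1),
            (i + a).choose a * ((m + 1 - i) + b).choose (b + 1)
              = (i + a).choose a * ((m - i) + (b + 1)).choose (b + 1) := by
          intro i hi
          simp only [Finset.mem_range] at hi
          exact congrArg _ (pvChooseCongr _ _ _ _ (by omega) rfl)
        rw [hlast, Nat.mul_zero, Nat.add_zero, Finset.sum_congr rfl hbody, ihm]
      rw [h1, h2]
      have h := Nat.choose_succ_succ' (m + a + b + 2) (a + b + 1)
      have e1 : (m + 1 + a + (b + 1) + 1).choose (a + (b + 1) + 1)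
          = (m + a + b + 2 + 1).choose (a + b + 1 + 1) := pvChooseCongr _ _ _ _ (by omega) (by omega)
      have e2 : (m + 1 + a + b + 1).choose (a + b + 1) = (m + a + b + 2).choose (a + b + 1) :=
        pvChooseCongr _ _ _ _ (by omega) rfl
      have e3 : (m + a + (b + 1) + 1).choose (a + (b + 1) + 1)
          = (m + a + b + 2).choose (a + b + 1 + 1) := pvChooseCongr _ _ _ _ (by omega) (by omega)
      omega

theorem pvFallFact_eq_descFactorial (m : Nat) : ∀ r : Nat, pvFallFact m r = Nat.descFactorial m r := by
  intro r
  induction r with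
  | zero => rfl
  | succ r ih =>
    unfold pvFallFact at *
    rw [List.range_succ, List.foldl_append, ih, Nat.descFactorial_succ, List.foldl_cons,
      List.foldl_nil, Nat.mul_comm]

theorem pvPyCombNat_eq_choose (m r : Nat) : pyCombNat m r = Nat.choose m r := by
  unfold pyCombNat
  split_ifs with h
  · rw [pvFallFact_eq_descFactorial, ← Nat.choose_eq_descFactorial_div_factorial]
    rcases Nat.le_total r (m - r) with hle | hle
    · rw [Nat.min_eq_left hle]
    · rw [Nat.min_eq_right hle]
      exact Nat.choose_symm h
  · rw [Nat.choose_eq_zero_of_lt (by omega)]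

theorem pvComb_nonneg (m r : Int) (hm : 0 ≤ m) (hr : 0 ≤ r) :
    pyComb m r = (Nat.choose m.toNat r.toNat : Int) := by
  simp [pyComb, hm, hr, pvPyCombNat_eq_choose]

theorem pvListSumRange (f : ℕ → ℤ) : ∀ n : ℕ,
    ((List.range n).map f).sum = ∑ i ∈ Finset.range n, f i := by
  intro n
  induction n with
  | zero => simp
  | succ n ih =>
    rw [List.range_succ, List.map_append, List.sum_append, Finset.sum_range_succ, ih]
    simp

-- A's loop sum equals B's single binomial, for every k ≥ 2, n ≥ 2 - k.
theorem pvLoopSum (k n : Int) (hk : 2 ≤ k) (hn : 2 - k ≤ n) :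
    ((PySem.List.pyRange 1 (n + 1) 1).map
        (fun j => pyComb (j - 1 + k - 1) (k - 1) * pyComb (n - j - 1 + k - 1) (k - 1))).sum
      = pyComb (n + 2 * k - 3) (2 * k - 1) := by
  by_cases hn2 : 2 ≤ n
  · obtain ⟨K, hK⟩ : ∃ K : ℕ, k = (K : Int) + 2 := ⟨(k - 2).toNat, by omega⟩
    obtain ⟨N, hN⟩ : ∃ N : ℕ, n = (N : Int) + 2 := ⟨(n - 2).toNat, by omega⟩
    subst hK hN
    rw [PySem.List.pyRange_one]
    have hlen : ((N : Int) + 2 + 1 - 1).toNat = N + 2 := by omega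
    rw [hlen, List.map_map, pvListSumRange, Finset.sum_range_succ]
    have hlast : (Function.comp
        (fun j => pyComb (j - 1 + ((K : Int) + 2) - 1) ((K : Int) + 2 - 1) *
          pyComb ((N : Int) + 2 - j - 1 + ((K : Int) + 2) - 1) ((K : Int) + 2 - 1))
        (fun t : ℕ => (1 : Int) + t)) (N + 1) = 0 := by
      have : pyComb ((N : Int) + 2 - (1 + (N + 1 : ℕ)) - 1 + ((K : Int) + 2) - 1) ((K : Int) + 2 - 1) = 0 := by
        rw [pvComb_nonneg _ _ (by push_cast; omega) (by omega)]
        have hlt : ((N : Int) + 2 - (1 + (N + 1 : ℕ)) - 1 + ((K : Int) + 2) - 1).toNat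
            < ((K : Int) + 2 - 1).toNat := by push_cast; omega
        rw [Nat.choose_eq_zero_of_lt hlt]; simp
      simp only [Function.comp]
      rw [this, mul_zero]
    rw [hlast, add_zero]
    have hbody : ∀ i ∈ Finset.range (N + 1),
        (Function.comp
          (fun j => pyComb (j - 1 + ((K : Int) + 2) - 1) ((K : Int) + 2 - 1) *
            pyComb ((N : Int) + 2 - j - 1 + ((K : Int) + 2) - 1) ((K : Int) + 2 - 1))
          (fun t : ℕ => (1 : Int) + t)) i
        = (((i + (K + 1)).choose (K + 1) * ((N - i + (K + 1)).choose (K + 1)) : ℕ) : ℤ) := by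
      intro i hi
      simp only [Finset.mem_range] at hi
      simp only [Function.comp]
      rw [pvComb_nonneg _ _ (by omega) (by omega),
        pvComb_nonneg _ _ (by omega) (by omega)]
      have a1 : ((1 : Int) + i - 1 + ((K : Int) + 2) - 1).toNat = i + (K + 1) := by omega
      have a2 : ((N : Int) + 2 - (1 + i) - 1 + ((K : Int) + 2) - 1).toNat = N - i + (K + 1) := by
        omega
      have a3 : (((K : Int) + 2 - 1)).toNat = K + 1 := by omega
      rw [a1, a2, a3]; push_cast; ring
    rw [Finset.sum_congr rfl hbody, ← Nat.cast_sum]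
    rw [pvComb_nonneg _ _ (by omega) (by omega)]
    have hc := pvConv (K + 1) (K + 1) N
    have b1 : ((N : Int) + 2 + 2 * ((K : Int) + 2) - 3).toNat = N + (K + 1) + (K + 1) + 1 := by omega
    have b2 : ((2 : Int) * ((K : Int) + 2) - 1).toNat = (K + 1) + (K + 1) + 1 := by omega
    rw [b1, b2, hc]
  · have hR : pyComb (n + 2 * k - 3) (2 * k - 1) = 0 := by
      rw [pvComb_nonneg _ _ (by omega) (by omega)]
      rw [Nat.choose_eq_zero_of_lt (by omega)]; simp
    rw [hR]
    by_cases h1 : n ≤ 0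
    · rw [PySem.List.pyRange_one_eq_nil (by omega)]; simp
    · have hn1 : n = 1 := by omega
      subst hn1
      rw [PySem.List.pyRange_one_singleton]
      have : pyComb ((1 : Int) - 1 - 1 + k - 1) (k - 1) = 0 := by
        rw [pvComb_nonneg _ _ (by omega) (by omega)]
        rw [Nat.choose_eq_zero_of_lt (by omega)]; simp
      simp only [List.map_cons, List.map_nil, List.sum_cons, List.sum_nil]
      rw [this, mul_zero, add_zero]

-- ===== VERDICT (by name: the statement is the Claim_ definition above) =====
theorem conj_one_sign_spec : Claim_equal_conj_one_sign := by
  intro k n _ hpre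
  obtain ⟨hk, hn, _⟩ := hpre
  show conj_one_sign k n = conj_one_sign_alt k n
  simp only [conj_one_sign, conj_one_sign_alt]
  rw [PySem.List.foldl_add, pvLoopSum k n hk hn]
  split_ifs with h
  · have a1 : PySem.Int.floordiv (k + 1) 2 - 1 + k - 1 = PySem.Int.floordiv (k + 1) 2 + k - 2 := by
      ring
    have a2 : n - PySem.Int.floordiv (k + 1) 2 - 1 + k - 1
        = n - PySem.Int.floordiv (k + 1) 2 + k - 2 := by ring
    rw [a1, a2]
    ring
  · ring
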